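-- pv_equiv track=rewrite | github.com/tpett20/LeetCode | 748.py | is_completing_word
-- ===== SOURCE A (Python) =====
-- def is_completing_word(string: str, target: str) -> bool:
--     ref = {}
--     for char in string:
--         ref[char] = ref.get(char, 0) + 1
--     for char in target:
--         if ref.get(char, 0):
--             ref[char] -= 1
--         else:
--             return False
--     return True
-- ===== SOURCE B (Python) =====
-- def is_completing_word(string: str, target: str) -> bool:
--     # Sort both strings; sorted(target) must be a subsequence of sorted(string).
--     s = sorted(string)
--     t = sorted(target)
--     i = 0
--     for c in t:
--         while i < len(s) and s[i] != c:
--             i += 1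
--         if i == len(s):
--             return False
--         i += 1
--     return True
-- ===== Notes on version B (the rewrite author's own statement) =====
-- stated objective: alternative
-- what changed: B sorts both strings and greedily checks that sorted(target) is a subsequence of sorted(string) (a merge scan), replacing A's hash-table counting with an early-exit decrement loop; no frequency table is built at all.
import Mathlib
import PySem

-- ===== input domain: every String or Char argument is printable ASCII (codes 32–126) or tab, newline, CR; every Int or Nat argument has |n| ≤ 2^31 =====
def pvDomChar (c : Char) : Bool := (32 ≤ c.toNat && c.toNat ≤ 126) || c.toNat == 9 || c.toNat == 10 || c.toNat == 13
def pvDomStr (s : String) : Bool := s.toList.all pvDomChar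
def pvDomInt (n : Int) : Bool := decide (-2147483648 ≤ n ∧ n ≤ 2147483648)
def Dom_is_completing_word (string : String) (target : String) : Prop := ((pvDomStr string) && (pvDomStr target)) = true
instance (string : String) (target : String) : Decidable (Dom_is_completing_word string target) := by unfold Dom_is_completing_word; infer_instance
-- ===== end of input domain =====

-- B sorts both strings and checks sorted(target) is a subsequence of sorted(string) by a greedy merge scan, instead of A's hash-table counting with decrement and early return; objective: alternative algorithm.


-- ===== PORT A =====
-- the 'ref[char] = ref.get(char, 0) + 1' counting loop
def pvCount (l : List Char) : PySem.Dict Char Int :=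
  l.foldl (fun d c => d.insert c (d.getD c 0 + 1)) PySem.Dict.empty

-- the 'for char in target' loop with its early 'return False'
def pvALoop (d : PySem.Dict Char Int) : List Char → Bool
  | [] => true
  | c :: cs =>
    if d.getD c 0 ≠ 0 then pvALoop (d.insert c (d.getD c 0 - 1)) cs
    else false

def is_completing_word (string : String) (target : String) : Bool :=
  let ref := pvCount string.toList
  pvALoop ref target.toList

-- ===== PORT B =====
-- B's 'for c in t: advance i past mismatches in s; fail if s exhausted, else consume s[i]'
-- (the i-cursor over s becomes the structural suffix of s)
def pvScan : List Char → List Char → Bool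
  | [], _ => true
  | _ :: _, [] => false
  | c :: cs, x :: xs => if x = c then pvScan cs xs else pvScan (c :: cs) xs

def is_completing_word_alt (string : String) (target : String) : Bool :=
  let s := PySem.List.sorted string.toList (fun x => x) false
  let t := PySem.List.sorted target.toList (fun x => x) false
  pvScan t s

-- ===== PRECONDITION & SPEC =====
def Spec_is_completing_word (string : String) (target : String) (out : Bool) : Prop := out = is_completing_word_alt string target
instance (string : String) (target : String) (out : Bool) : Decidable (Spec_is_completing_word string target out) := by unfold Spec_is_completing_word; infer_instance

-- ===== CLAIM =====
def Claim_equal_is_completing_word : Prop := ∀ (string : String) (target : String), Dom_is_completing_word string target → Spec_is_completing_word string target (is_completing_word string target)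

-- ===== LEMMAS AND PROOFS =====

-- count over a cons, in Int form
lemma pvCountConsInt (x c : Char) (cs : List Char) :
    (((c :: cs).count x : Int)) = (cs.count x : Int) + (if x = c then 1 else 0) := by
  by_cases hxc : x = c
  · simp [List.count_cons, hxc]
  · simp [List.count_cons, hxc, Ne.symm hxc]

-- A's loop succeeds iff the remaining target multiset fits in the (nonnegative) table
lemma pvALoop_eq_true_iff (rest : List Char) (d : PySem.Dict Char Int)
    (hnn : ∀ c, 0 ≤ d.getD c 0) :
    pvALoop d rest = true ↔ ∀ c, (rest.count c : Int) ≤ d.getD c 0 := by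
  induction rest generalizing d with
  | nil => simp [pvALoop]; intro c; exact hnn c
  | cons c cs ih =>
    simp only [pvALoop]
    by_cases h : d.getD c 0 ≠ 0
    · rw [if_pos h, ih _ (by
        intro x
        rw [PySem.Dict.getD_insert]
        split_ifs with hx
        · have h1 := hnn c; omega
        · exact hnn x)]
      constructor
      · intro hall x
        have hx := hall x
        rw [PySem.Dict.getD_insert] at hx
        rw [pvCountConsInt]
        split_ifs at hx ⊢ with hxc
        · rw [hxc] at hx ⊢; omega
        · omega
      · intro hall x
        have hx := hall x
        rw [pvCountConsInt] at hx
        rw [PySem.Dict.getD_insert]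
        split_ifs at hx ⊢ with hxc
        · rw [hxc] at hx ⊢; omega
        · omega
    · rw [if_neg h]
      simp only [Bool.false_eq_true, false_iff]
      intro hall
      have hc := hall c
      rw [pvCountConsInt, if_pos rfl] at hc
      have := Int.natCast_nonneg (cs.count c)
      omega

lemma pvFoldCounter (l : List Char) : pvCount l = PySem.Dict.counter l :=
  PySem.Dict.foldl_insert_getD_add_one_eq_counter l

-- the greedy scan decides the Sublist (subsequence) relation
lemma pvScan_iff_sublist (t s : List Char) : pvScan t s = true ↔ t.Sublist s := by
  induction s generalizing t with
  | nil =>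
    cases t with
    | nil => simp [pvScan]
    | cons c cs => simp [pvScan]
  | cons x xs ih =>
    cases t with
    | nil => simp [pvScan]
    | cons c cs =>
      simp only [pvScan]
      by_cases hxc : x = c
      · subst hxc
        rw [if_pos rfl, ih, List.cons_sublist_cons]
      · rw [if_neg hxc, ih, List.sublist_cons_iff]
        constructor
        · exact Or.inl
        · rintro (h | ⟨r, hr, _⟩)
          · exact h
          · exact absurd (List.cons.injEq .. ▸ hr).1.symm hxc

-- sortedness of the id-key Python sort, as Mathlib's SortedLE
lemma pvSortedLE (l : List Char) :
    (PySem.List.sorted l (fun x => x) false).SortedLE := by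
  rw [List.sortedLE_iff_pairwise]
  exact PySem.List.sorted_pairwise l (fun x => x)

theorem is_completing_word_spec : Claim_equal_is_completing_word := by
  intro string target _
  unfold Spec_is_completing_word is_completing_word is_completing_word_alt
  simp only [pvFoldCounter]
  rw [Bool.eq_iff_iff]
  rw [pvALoop_eq_true_iff _ _ (by intro c; rw [PySem.Dict.getD_counter]; positivity)]
  rw [pvScan_iff_sublist]
  have hps := PySem.List.sorted_perm string.toList (fun x => x) false
  have hpt := PySem.List.sorted_perm target.toList (fun x => x) false
  constructor
  · intro hall
    refine List.sublist_of_subperm_of_sortedLE ?_ (pvSortedLE _) (pvSortedLE _)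
    rw [List.subperm_ext_iff]
    intro x _
    rw [hps.count_eq, hpt.count_eq]
    have := hall x
    rw [PySem.Dict.getD_counter] at this
    exact_mod_cast this
  · intro hsub c
    rw [PySem.Dict.getD_counter]
    have := hsub.subperm.count_le c
    rw [hps.count_eq, hpt.count_eq] at this
    exact_mod_cast this
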